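-- pv_equiv track=rewrite | github.com/merledu/oxygen | Temp/stats.py | count_data_transfer_instructions
-- ===== SOURCE A (Python) =====
-- def count_data_transfer_instructions(instruction_string):
--     data_transfer_ops = ["sw", "sb", "sh", "lb", "lh", "lw", "lbu", "lhu"]
--     lines = instruction_string.splitlines()
--     data_transfer_instructions = 0
--     for line in lines:
--         stripped_line = line.strip()
--         if any(op in stripped_line for op in data_transfer_ops):
--             data_transfer_instructions += 1
--     return data_transfer_instructions
-- ===== SOURCE B (Python) =====
-- def count_data_transfer_instructions(instruction_string):
--     # A line matches iff it contains one of the 2-char op mnemonics as a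
--     # substring ("lbu"/"lhu" already contain "lb"/"lh", and strip() cannot
--     # affect membership of a whitespace-free substring), so a single scan
--     # over adjacent character pairs per line suffices.
--     ops = {("s", "w"), ("s", "b"), ("s", "h"), ("l", "b"), ("l", "h"), ("l", "w")}
--     return sum(
--         1
--         for line in instruction_string.splitlines()
--         if any(pair in ops for pair in zip(line, line[1:]))
--     )
-- ===== Notes on version B (the rewrite author's own statement) =====
-- stated objective: alternative
-- what changed: Instead of stripping each line and running eight independent substring scans, B observes that the eight ops reduce to six whitespace-free two-character substrings and counts, in one pass per line, the lines with an adjacent character pair in that set.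
import Mathlib
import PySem

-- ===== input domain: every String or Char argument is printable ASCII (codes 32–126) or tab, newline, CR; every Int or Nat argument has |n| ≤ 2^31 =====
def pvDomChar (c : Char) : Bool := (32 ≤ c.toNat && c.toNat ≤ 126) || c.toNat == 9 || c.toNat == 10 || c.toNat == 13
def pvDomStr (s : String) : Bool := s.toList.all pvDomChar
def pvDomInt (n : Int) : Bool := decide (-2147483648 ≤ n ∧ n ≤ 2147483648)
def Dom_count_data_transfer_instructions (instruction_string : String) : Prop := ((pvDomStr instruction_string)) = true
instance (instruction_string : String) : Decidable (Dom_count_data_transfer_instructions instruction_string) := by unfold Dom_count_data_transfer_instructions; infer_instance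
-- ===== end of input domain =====

-- B replaces the per-line strip plus eight independent substring scans by one scan of the
-- line's adjacent character pairs against the six two-character mnemonics (alternative, same cost).

-- ===== PORT A =====
def count_data_transfer_instructions (instruction_string : String) : Int :=
  let data_transfer_ops : List String := ["sw", "sb", "sh", "lb", "lh", "lw", "lbu", "lhu"]
  let lines := PySem.Str.splitlines instruction_string
  lines.foldl
    (fun data_transfer_instructions line =>
      let stripped_line := PySem.Str.strip line
      if data_transfer_ops.any (fun op => PySem.Str.isIn op stripped_line) then
        data_transfer_instructions + 1
      else
        data_transfer_instructions)
    0

-- ===== PORT B =====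
-- the six whitespace-free two-character op pairs (Source B's `ops` set)
def pvOps : PySem.Set (Char × Char) :=
  PySem.Set.ofList [('s', 'w'), ('s', 'b'), ('s', 'h'), ('l', 'b'), ('l', 'h'), ('l', 'w')]

def count_data_transfer_instructions_alt (instruction_string : String) : Int :=
  (((PySem.Str.splitlines instruction_string).countP
      (fun line =>
        (line.toList.zip line.toList.tail).any (fun pair => PySem.Set.contains pvOps pair)) : Nat) : Int)

-- ===== PRECONDITION & SPEC =====
def Spec_count_data_transfer_instructions (instruction_string : String) (out : Int) : Prop := out = count_data_transfer_instructions_alt instruction_string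
instance (instruction_string : String) (out : Int) : Decidable (Spec_count_data_transfer_instructions instruction_string out) := by unfold Spec_count_data_transfer_instructions; infer_instance

-- ===== CLAIM (what is proved, stated in full; the proofs are below) =====
def Claim_equal_count_data_transfer_instructions : Prop := ∀ (instruction_string : String), Dom_count_data_transfer_instructions instruction_string → Spec_count_data_transfer_instructions instruction_string (count_data_transfer_instructions instruction_string)

-- ===== LEMMAS AND PROOFS =====

-- B's per-line pair scan finds exactly the two-char op-pair infixes
lemma pv_zip_any_iff (cs : List Char) :
    ((cs.zip cs.tail).any (fun pair => PySem.Set.contains pvOps pair)) = true ↔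
      ∃ x y, PySem.Set.contains pvOps (x, y) = true ∧ [x, y] <:+: cs := by
  induction cs with
  | nil =>
    simp
  | cons a t ih =>
    cases t with
    | nil =>
      simp only [List.zip_nil_right, List.tail_cons, List.any_nil]
      constructor
      · intro h; simp at h
      · rintro ⟨x, y, -, h⟩
        have := h.length_le
        simp at this
    | cons b t' =>
      simp only [List.tail_cons] at ih
      simp only [List.tail_cons, List.zip_cons_cons, List.any_cons, Bool.or_eq_true]
      rw [ih]
      constructor
      · rintro (h | ⟨x, y, hc, hinf⟩)
        · exact ⟨a, b, h, [], t', rfl⟩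
        · exact ⟨x, y, hc, hinf.trans (List.suffix_cons a _).isInfix⟩
      · rintro ⟨x, y, hc, hinf⟩
        rcases List.infix_cons_iff.mp hinf with hpre | hinf'
        · rcases List.cons_prefix_cons.mp hpre with ⟨rfl, hpre2⟩
          rcases List.cons_prefix_cons.mp hpre2 with ⟨rfl, -⟩
          exact Or.inl hc
        · exact Or.inr ⟨x, y, hc, hinf'⟩

-- a pair infix whose first char survives dropWhile survives dropWhile
lemma pv_infix_dropWhile {p : Char → Bool} {x y : Char} (hx : p x = false) :
    ∀ cs : List Char, [x, y] <:+: cs → [x, y] <:+: cs.dropWhile p := by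
  intro cs
  induction cs with
  | nil => exact fun h => h
  | cons a t ih =>
    intro h
    by_cases ha : p a = true
    · rw [List.dropWhile_cons_of_pos ha]
      rcases List.infix_cons_iff.mp h with hpre | hinf
      · rcases List.cons_prefix_cons.mp hpre with ⟨rfl, -⟩
        rw [ha] at hx; cases hx
      · exact ih hinf
    · rw [List.dropWhile_cons_of_neg ha]
      exact h

-- strip never affects a whitespace-free two-char infix
lemma pv_pair_infix_strip (x y : Char) (hx : PySem.Chars.isspace x = false)
    (hy : PySem.Chars.isspace y = false) (cs : List Char) :
    [x, y] <:+: PySem.Chars.strip cs ↔ [x, y] <:+: cs := by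
  constructor
  · intro h
    refine h.trans ?_
    unfold PySem.Chars.strip PySem.Chars.rstrip PySem.Chars.lstrip
    have h2 : List.dropWhile PySem.Chars.isspace (List.dropWhile PySem.Chars.isspace cs).reverse
        <:+ (List.dropWhile PySem.Chars.isspace cs).reverse := List.dropWhile_suffix _
    have h3 := List.reverse_prefix.mpr h2
    rw [List.reverse_reverse] at h3
    exact h3.isInfix.trans (List.dropWhile_suffix _).isInfix
  · intro h
    unfold PySem.Chars.strip PySem.Chars.rstrip PySem.Chars.lstrip
    have h1 : [x, y] <:+: List.dropWhile PySem.Chars.isspace cs :=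
      pv_infix_dropWhile hx _ h
    have h2 : [y, x] <:+: (List.dropWhile PySem.Chars.isspace cs).reverse := by
      have : [x, y].reverse <:+: (List.dropWhile PySem.Chars.isspace cs).reverse :=
        List.reverse_infix.mpr h1
      simpa using this
    have h3 : [y, x] <:+: List.dropWhile PySem.Chars.isspace
        (List.dropWhile PySem.Chars.isspace cs).reverse :=
      pv_infix_dropWhile hy _ h2
    have h4 : [y, x].reverse <:+: (List.dropWhile PySem.Chars.isspace
        (List.dropWhile PySem.Chars.isspace cs).reverse).reverse :=
      List.reverse_infix.mpr h3
    simpa using h4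

-- A's eight-op test over the stripped line equals the pair-infix criterion
lemma pv_ops_iff (cs : List Char) :
    ((["sw", "sb", "sh", "lb", "lh", "lw", "lbu", "lhu"] : List String).any
        (fun op => PySem.Chars.isIn op.toList (PySem.Chars.strip cs))) = true ↔
      ∃ x y, PySem.Set.contains pvOps (x, y) = true ∧ [x, y] <:+: cs := by
  constructor
  · intro h
    rcases List.any_eq_true.mp h with ⟨op, hop, hin⟩
    have hinf := (PySem.Chars.isIn_iff_infix _ _).mp hin
    fin_cases hop
    · exact ⟨'s', 'w', by decide, (pv_pair_infix_strip _ _ (by decide) (by decide) cs).mp hinf⟩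
    · exact ⟨'s', 'b', by decide, (pv_pair_infix_strip _ _ (by decide) (by decide) cs).mp hinf⟩
    · exact ⟨'s', 'h', by decide, (pv_pair_infix_strip _ _ (by decide) (by decide) cs).mp hinf⟩
    · exact ⟨'l', 'b', by decide, (pv_pair_infix_strip _ _ (by decide) (by decide) cs).mp hinf⟩
    · exact ⟨'l', 'h', by decide, (pv_pair_infix_strip _ _ (by decide) (by decide) cs).mp hinf⟩
    · exact ⟨'l', 'w', by decide, (pv_pair_infix_strip _ _ (by decide) (by decide) cs).mp hinf⟩
    · -- "lbu": its infix contains the infix "lb"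
      exact ⟨'l', 'b', by decide, (pv_pair_infix_strip _ _ (by decide) (by decide) cs).mp
        ((show (['l', 'b'] : List Char) <:+: ("lbu" : String).toList by decide).trans hinf)⟩
    · exact ⟨'l', 'h', by decide, (pv_pair_infix_strip _ _ (by decide) (by decide) cs).mp
        (List.IsInfix.trans ⟨[], [['u'].head (by simp)], by simp⟩ hinf)⟩
  · rintro ⟨x, y, hc, hinf⟩
    have hmem : (x, y) ∈ [('s', 'w'), ('s', 'b'), ('s', 'h'), ('l', 'b'), ('l', 'h'), ('l', 'w')] := by
      have := hc
      simp [pvOps, PySem.Set.contains_eq_listContains] at this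
      simpa using this
    apply List.any_eq_true.mpr
    fin_cases hmem
    · exact ⟨"sw", by simp, (PySem.Chars.isIn_iff_infix _ _).mpr
        ((pv_pair_infix_strip _ _ (by decide) (by decide) cs).mpr hinf)⟩
    · exact ⟨"sb", by simp, (PySem.Chars.isIn_iff_infix _ _).mpr
        ((pv_pair_infix_strip _ _ (by decide) (by decide) cs).mpr hinf)⟩
    · exact ⟨"sh", by simp, (PySem.Chars.isIn_iff_infix _ _).mpr
        ((pv_pair_infix_strip _ _ (by decide) (by decide) cs).mpr hinf)⟩
    · exact ⟨"lb", by simp, (PySem.Chars.isIn_iff_infix _ _).mpr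
        ((pv_pair_infix_strip _ _ (by decide) (by decide) cs).mpr hinf)⟩
    · exact ⟨"lh", by simp, (PySem.Chars.isIn_iff_infix _ _).mpr
        ((pv_pair_infix_strip _ _ (by decide) (by decide) cs).mpr hinf)⟩
    · exact ⟨"lw", by simp, (PySem.Chars.isIn_iff_infix _ _).mpr
        ((pv_pair_infix_strip _ _ (by decide) (by decide) cs).mpr hinf)⟩

-- the two per-line predicates agree
lemma pv_line_pred_eq (line : String) :
    ((["sw", "sb", "sh", "lb", "lh", "lw", "lbu", "lhu"] : List String).any
        (fun op => PySem.Str.isIn op (PySem.Str.strip line)))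
      = (line.toList.zip line.toList.tail).any (fun pair => PySem.Set.contains pvOps pair) := by
  rw [Bool.eq_iff_iff]
  have hA : ∀ op : String, PySem.Str.isIn op (PySem.Str.strip line)
      = PySem.Chars.isIn op.toList (PySem.Chars.strip line.toList) := by
    intro op
    simp [PySem.Str.isIn_eq, PySem.Str.toList_strip]
  simp only [hA]
  rw [pv_ops_iff, pv_zip_any_iff]

-- ===== VERDICT (by name: the statement is the Claim_ definition above) =====
theorem count_data_transfer_instructions_spec : Claim_equal_count_data_transfer_instructions := by
  intro s _
  unfold Spec_count_data_transfer_instructions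
  unfold count_data_transfer_instructions count_data_transfer_instructions_alt
  simp only []
  rw [PySem.List.foldl_count_if
      (fun line => (["sw", "sb", "sh", "lb", "lh", "lw", "lbu", "lhu"] : List String).any
        (fun op => PySem.Str.isIn op (PySem.Str.strip line)))]
  rw [List.countP_congr (fun line _ => by rw [pv_line_pred_eq line])]
  simp
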